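-- pv_equiv track=rewrite | github.com/Bleomoon/Python | Mooc/Semaine 2/exos.py | carre
-- ===== SOURCE A (Python) =====
-- def carre(ligne):
--     new_liste = []
--     i = 0
--     x = 0
--     while x < len(ligne):
--         if ligne[x] >= '0' and ligne[x] <= '9':
--             x2 = x
--             while x2 < len(ligne) and  ligne[x2] >= '0' and ligne[x2] <= '9':
--                 x2 += 1
--             new_liste += [ligne[x:x2]]
--             x = x2
--             i+=1
--         x+=1
--     liste = []
--     for i in range(0, len(new_liste)):
--         new_liste[i] = str(int(new_liste[i])**2)
--     return ':'.join(new_liste)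
-- ===== SOURCE B (Python) =====
-- def carre(ligne):
--     out = ''
--     run = ''
--     for c in reversed(ligne):
--         if '0' <= c <= '9':
--             run = c + run
--         else:
--             if run:
--                 out = str(int(run) ** 2) + (':' + out if out else '')
--                 run = ''
--     if run:
--         out = str(int(run) ** 2) + (':' + out if out else '')
--     return out
-- ===== Notes on version B (the rewrite author's own statement) =====
-- stated objective: alternative
-- what changed: A scans forward with an index, an inner run-advancing while loop and slicing, collects the runs in a list, squares them in a second pass and joins; B traverses the string once in reverse with a (pending-run, output) accumulator and builds the final colon-separated result string directly back-to-front, with no run list and no join.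
import Mathlib
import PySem

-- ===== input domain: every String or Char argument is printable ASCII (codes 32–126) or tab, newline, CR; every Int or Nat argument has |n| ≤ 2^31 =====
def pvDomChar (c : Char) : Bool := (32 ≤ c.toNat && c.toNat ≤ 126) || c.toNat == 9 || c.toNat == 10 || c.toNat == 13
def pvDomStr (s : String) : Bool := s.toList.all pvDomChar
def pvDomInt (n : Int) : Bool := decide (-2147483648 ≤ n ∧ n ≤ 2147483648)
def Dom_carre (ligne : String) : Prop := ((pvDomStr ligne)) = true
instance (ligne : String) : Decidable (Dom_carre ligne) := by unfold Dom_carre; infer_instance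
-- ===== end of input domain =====

-- B replaces A's forward index scanner (inner while + slicing, list of runs, final join) by a reverse
-- traversal that builds the final colon-separated output string directly back-to-front (no run list, no slicing, no join).

-- '0' <= c <= '9' (Python char comparison, exact on ASCII)
def pvIsDig (c : Char) : Bool := decide ('0' ≤ c ∧ c ≤ '9')

-- ===== PORT A =====
-- str(int(s)**2); s is always a nonempty digit run so ofStr? succeeds (getD 0 is never used)
def pvSq (s : List Char) : String := PySem.Int.toStr (((PySem.Int.ofStr? (String.ofList s)).getD 0) ^ 2)

-- inner while: 'while x2 < len(ligne) and ligne[x2] >= '0' and ligne[x2] <= '9': x2 += 1'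
def pvInnerA (l : List Char) (x2 : Nat) : Nat :=
  if h : x2 < l.length then
    if pvIsDig l[x2] then pvInnerA l (x2 + 1) else x2
  else x2
termination_by l.length - x2

-- needed for the termination of the outer loop
theorem pvInnerA_ge (l : List Char) (x : Nat) : x ≤ pvInnerA l x := by
  fun_induction pvInnerA l x with
  | case1 x h hd ih => omega
  | case2 x h hd => omega
  | case3 x h => omega

-- outer while loop, carrying new_liste (the variable i is dead state and is dropped)
def pvOuterA (l : List Char) (x : Nat) (acc : List (List Char)) : List (List Char) :=
  if h : x < l.length then
    if pvIsDig l[x] then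
      let x2 := pvInnerA l x
      -- 'new_liste += [ligne[x:x2]]; x = x2; x += 1'
      pvOuterA l (x2 + 1) (acc ++ [(l.drop x).take (x2 - x)])
    else pvOuterA l (x + 1) acc
  else acc
termination_by l.length - x
decreasing_by
  · have := pvInnerA_ge l x; omega
  · omega

def carre (ligne : String) : String :=
  -- new_liste := the outer while-loop's accumulator; then
  -- 'for i in range(0, len(new_liste)): new_liste[i] = str(int(new_liste[i])**2)' and the join
  PySem.Str.join ":" ((pvOuterA ligne.toList 0 []).map pvSq)

-- ===== PORT B =====
-- str(int(run)**2) on the char-list side; run is always a nonempty digit run so ofChars? succeeds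
def pvSqChars (run : List Char) : List Char :=
  PySem.Int.toChars (((PySem.Int.ofChars? run).getD 0) ^ 2)

-- loop body of 'for c in reversed(ligne)', state = (run, out) as char lists
def pvStepB (c : Char) (st : List Char × List Char) : List Char × List Char :=
  if pvIsDig c then (c :: st.1, st.2)
  else if st.1 ≠ [] then
    ([], pvSqChars st.1 ++ (if st.2 ≠ [] then ':' :: st.2 else []))
  else st

def carre_alt (ligne : String) : String :=
  let st := ligne.toList.foldr pvStepB ([], [])
  -- final 'if run: out = str(int(run)**2) + (':' + out if out else '')'
  String.ofList (if st.1 ≠ [] then pvSqChars st.1 ++ (if st.2 ≠ [] then ':' :: st.2 else []) else st.2)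

-- ===== PRECONDITION & SPEC =====
def Spec_carre (ligne : String) (out : String) : Prop := out = carre_alt ligne
instance (ligne : String) (out : String) : Decidable (Spec_carre ligne out) := by unfold Spec_carre; infer_instance

-- ===== CLAIM (what is proved, stated in full; the proofs are below) =====
def Claim_equal_carre : Prop := ∀ (ligne : String), Dom_carre ligne → Spec_carre ligne (carre ligne)

-- ===== LEMMAS AND PROOFS =====

-- the maximal digit runs of l, left to right (proof-side characterisation shared by both directions)
def pvRunsB (l : List Char) : List (List Char) :=
  match l with
  | [] => []
  | c :: cs =>
    if pvIsDig c then (c :: cs.takeWhile pvIsDig) :: pvRunsB (cs.dropWhile pvIsDig)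
    else pvRunsB cs
termination_by l.length
decreasing_by
  · have := cs.length_dropWhile_le pvIsDig; simp; omega
  · simp

-- colon-joined squared runs, on the char-list side
def pvJ (rs : List (List Char)) : List Char := List.intercalate [':'] (rs.map pvSqChars)

theorem pv_take_length_takeWhile (p : Char → Bool) (l : List Char) :
    l.take (l.takeWhile p).length = l.takeWhile p := by
  induction l with
  | nil => simp
  | cons c cs ih => by_cases h : p c <;> simp [h, ih]

theorem pv_drop_length_takeWhile (p : Char → Bool) (l : List Char) :
    l.drop (l.takeWhile p).length = l.dropWhile p := by
  induction l with
  | nil => simp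
  | cons c cs ih => by_cases h : p c <;> simp [h, ih]

theorem pv_dropWhile_head_false (p : Char → Bool) :
    ∀ (l : List Char) (c : Char) (cs : List Char), l.dropWhile p = c :: cs → p c = false := by
  intro l
  induction l with
  | nil => intro c cs h; simp at h
  | cons d ds ih =>
    intro c cs h
    rw [List.dropWhile_cons] at h
    by_cases hp : p d
    · rw [if_pos hp] at h; exact ih c cs h
    · rw [if_neg hp] at h
      cases h
      simpa using hp

theorem pv_dropWhile_of_takeWhile_nil (p : Char → Bool) (l : List Char)
    (h : l.takeWhile p = []) : l.dropWhile p = l := by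
  cases l with
  | nil => rfl
  | cons c cs =>
    rw [List.takeWhile_cons] at h
    by_cases hp : p c
    · rw [if_pos hp] at h; simp at h
    · simp [hp]

-- the inner while lands exactly at the end of the digit run starting at x
theorem pvInnerA_eq (l : List Char) (x : Nat) :
    pvInnerA l x = x + ((l.drop x).takeWhile pvIsDig).length := by
  fun_induction pvInnerA l x with
  | case1 x h hd ih =>
    rw [ih, List.drop_eq_getElem_cons h, List.takeWhile_cons, if_pos hd]
    simp; omega
  | case2 x h hd =>
    rw [List.drop_eq_getElem_cons h, List.takeWhile_cons, if_neg hd]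
    simp
  | case3 x h =>
    have : l.drop x = [] := List.drop_eq_nil_of_le (by omega)
    simp [this]

-- A's outer scan, started at x, appends exactly the runs of the remaining suffix
theorem pvOuterA_eq (l : List Char) :
    ∀ (n x : Nat) (acc : List (List Char)), l.length - x ≤ n →
      pvOuterA l x acc = acc ++ pvRunsB (l.drop x) := by
  intro n
  induction n with
  | zero =>
    intro x acc hn
    have hx : ¬ x < l.length := by omega
    have : l.drop x = [] := List.drop_eq_nil_of_le (by omega)
    unfold pvOuterA
    simp [hx, this, pvRunsB]
  | succ n ih =>
    intro x acc hn
    by_cases hx : x < l.length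
    · have hdrop : l.drop x = l[x] :: l.drop (x + 1) := List.drop_eq_getElem_cons hx
      by_cases hd : pvIsDig l[x]
      · -- digit at x: one full run is consumed
        set t := ((l.drop x).takeWhile pvIsDig).length with ht
        have hinner : pvInnerA l x = x + t := by rw [pvInnerA_eq, ht]
        have ht1 : 1 ≤ t := by
          rw [ht, hdrop, List.takeWhile_cons, if_pos hd]; simp
        have hrest : l.drop (x + t) = (l.drop x).dropWhile pvIsDig := by
          rw [← pv_drop_length_takeWhile pvIsDig (l.drop x), List.drop_drop, ← ht]
        have hskip : pvRunsB (l.drop (x + t + 1)) = pvRunsB (l.drop (x + t)) := by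
          by_cases hlen : x + t < l.length
          · have hcons : l.drop (x + t) = l[x + t] :: l.drop (x + t + 1) :=
              List.drop_eq_getElem_cons hlen
            have hnd : pvIsDig l[x + t] = false := by
              apply pv_dropWhile_head_false pvIsDig (l.drop x)
              rw [← hrest]; exact hcons
            rw [hcons, pvRunsB, hnd]
            simp
          · have h1 : l.drop (x + t) = [] := List.drop_eq_nil_of_le (by omega)
            have h2 : l.drop (x + t + 1) = [] := List.drop_eq_nil_of_le (by omega)
            rw [h1, h2]
        have hruns : pvRunsB (l.drop x)
            = ((l.drop x).takeWhile pvIsDig) :: pvRunsB ((l.drop x).dropWhile pvIsDig) := by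
          rw [hdrop, pvRunsB, if_pos hd, List.takeWhile_cons, if_pos hd,
            List.dropWhile_cons, if_pos hd]
        unfold pvOuterA
        rw [dif_pos hx, if_pos hd]
        simp only [hinner]
        rw [ih (x + t + 1) _ (by omega), hskip, hrest, hruns]
        have h2 : x + t - x = t := by omega
        rw [h2, ht, pv_take_length_takeWhile]
        simp
      · unfold pvOuterA
        rw [dif_pos hx, if_neg hd]
        rw [ih (x + 1) acc (by omega)]
        rw [hdrop, pvRunsB, if_neg hd]
    · have : l.drop x = [] := List.drop_eq_nil_of_le (by omega)
      unfold pvOuterA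
      simp [hx, this, pvRunsB]

-- str(int(run)**2) is never the empty string
theorem pvSqChars_ne_nil (run : List Char) : pvSqChars run ≠ [] := by
  unfold pvSqChars PySem.Int.toChars
  split
  · simp
  · rw [Nat.toDigits_eq_if (by norm_num)]
    split <;> simp

theorem pvJ_eq_nil_iff (rs : List (List Char)) : pvJ rs = [] ↔ rs = [] := by
  cases rs with
  | nil => simp [pvJ, List.intercalate]
  | cons r rs' =>
    simp only [pvJ, List.map_cons]
    cases rs' with
    | nil => simp [List.intercalate, pvSqChars_ne_nil r]
    | cons r' rs'' =>
      simp [List.intercalate, pvSqChars_ne_nil r]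

-- a list with a digit head starts with its takeWhile run
theorem pvRunsB_cons_run (cs : List Char) (hr : cs.takeWhile pvIsDig ≠ []) :
    pvRunsB cs = (cs.takeWhile pvIsDig) :: pvRunsB (cs.dropWhile pvIsDig) := by
  cases cs with
  | nil => simp at hr
  | cons c' cs' =>
    rw [List.takeWhile_cons] at hr ⊢
    by_cases hd' : pvIsDig c'
    · rw [pvRunsB, if_pos hd', if_pos hd', List.dropWhile_cons, if_pos hd']
    · rw [if_neg hd'] at hr; simp at hr

-- pvJ on a nonempty-headed run list, matching B's flush expression
theorem pvJ_cons (r : List Char) (rs : List (List Char)) :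
    pvJ (r :: rs) = pvSqChars r ++ (if pvJ rs ≠ [] then ':' :: pvJ rs else []) := by
  cases rs with
  | nil => simp [pvJ, List.intercalate]
  | cons r' rs' =>
    have hne : pvJ (r' :: rs') ≠ [] := by
      rw [ne_eq, pvJ_eq_nil_iff]; simp
    rw [if_pos hne]
    simp [pvJ, List.intercalate]

-- B's reverse fold: the pending run is l's leading digit prefix, out is the joined rest
theorem pvFoldrB (l : List Char) :
    l.foldr pvStepB ([], []) = (l.takeWhile pvIsDig, pvJ (pvRunsB (l.dropWhile pvIsDig))) := by
  induction l with
  | nil => simp [pvRunsB, pvJ, List.intercalate]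
  | cons c cs ih =>
    rw [List.foldr_cons, ih]
    by_cases hd : pvIsDig c
    · simp [pvStepB, hd]
    · rw [List.takeWhile_cons, if_neg hd, List.dropWhile_cons, if_neg hd]
      by_cases hr : cs.takeWhile pvIsDig = []
      · have : cs.dropWhile pvIsDig = cs := pv_dropWhile_of_takeWhile_nil pvIsDig cs hr
        simp [pvStepB, hd, hr, this, pvRunsB]
      · -- head of cs is a digit: flushing the run prepends it to the joined rest
        rw [pvRunsB, if_neg hd, pvRunsB_cons_run cs hr, pvJ_cons]
        simp [pvStepB, hd, hr]

-- both ports compute String.ofList (pvJ (runs l))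
theorem carre_alt_eq (ligne : String) :
    carre_alt ligne = String.ofList (pvJ (pvRunsB ligne.toList)) := by
  unfold carre_alt
  rw [pvFoldrB]
  generalize ligne.toList = l
  by_cases hr : l.takeWhile pvIsDig = []
  · have hdw : l.dropWhile pvIsDig = l :=
      pv_dropWhile_of_takeWhile_nil pvIsDig l hr
    simp [hr, hdw]
  · rw [pvRunsB_cons_run l hr, pvJ_cons]
    simp [hr]

theorem pvSq_toList (s : List Char) : (pvSq s).toList = pvSqChars s := by
  unfold pvSq pvSqChars
  rw [PySem.Int.ofStr?_ofList, PySem.Int.toList_toStr]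

theorem carre_eq (ligne : String) :
    carre ligne = String.ofList (pvJ (pvRunsB ligne.toList)) := by
  unfold carre
  rw [pvOuterA_eq ligne.toList ligne.toList.length 0 [] (by omega), List.nil_append]
  unfold PySem.Str.join
  congr 1
  unfold PySem.Chars.join pvJ
  have hsep : (":" : String).toList = [':'] := by decide
  rw [hsep, List.map_map, List.drop_zero]
  congr 1
  exact List.map_congr_left (fun s _ => pvSq_toList s)

-- ===== VERDICT (by name: the statement is the Claim_ definition above) =====
theorem carre_spec : Claim_equal_carre := by
  intro ligne _
  unfold Spec_carre
  rw [carre_eq, carre_alt_eq]
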